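-- pv_equiv track=rewrite | github.com/thanhdaonguyen/caro-game-group-2-INT3401E-20 | main.py | count_attack_pattern
-- ===== SOURCE A (Python) =====
-- def count_attack_pattern(state, action, pattern):
--     row = action[0]
--     col = action[1]
--     state[row][col] = 'X'
--
--
--     count = 0
--     for i in range(len(pattern)):
--         if pattern[i] == 'X':
--
--             # direction (0, 1)
--             try:
--                 sample = []
--                 for j in range(col - i, col + len(pattern) - i):
--                     if j < 0 or j >= len(state[0]): break
--                     sample.append(state[row][j])
--                 if sample == pattern: count += 1
--             except:
--                 pass
--
--             # direction (1, 0)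
--             try:
--                 sample = []
--                 for j in range(row - i, row + len(pattern) - i):
--                     if j < 0 or j >= len(state[0]): break
--                     sample.append(state[j][col])
--                 if sample == pattern: count += 1
--             except:
--                 pass
--
--             # direction (1, 1)
--             try:
--                 sample = []
--                 for j in range(- i, len(pattern) - i):
--                     if row + j < 0 or row + j >= len(state[0]): break
--                     if col + j < 0 or col + j >= len(state[0]): break
--                     sample.append(state[row + j][col + j])
--                 if sample == pattern: count += 1
--             except:
--                 pass
--
--             # direction (1, -1)
--             try:
--                 sample = []
--                 for j in range(- i, len(pattern) - i):
--                     if row - j < 0 or row - j >= len(state[0]): break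
--                     if col + j < 0 or col + j >= len(state[0]): break
--                     sample.append(state[row - j][col + j])
--                 if sample == pattern: count += 1
--             except:
--                 pass
--
--     return count
-- ===== SOURCE B (Python) =====
-- def count_attack_pattern(state, action, pattern):
--     # NOTE: like the original, this mutates state by placing 'X' at the action cell.
--     row = action[0]
--     col = action[1]
--     state[row][col] = 'X'
--     k = len(pattern)
--
--     def fetch(r, c):
--         try:
--             return state[r][c]
--         except Exception:
--             return None
--
--     def bound(v):
--         return 0 <= v < len(state[0])
--
--     cells = [
--         lambda o: fetch(row, col + o) if bound(col + o) else None,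
--         lambda o: fetch(row + o, col) if bound(row + o) else None,
--         lambda o: fetch(row + o, col + o) if bound(row + o) and bound(col + o) else None,
--         lambda o: fetch(row - o, col + o) if bound(row - o) and bound(col + o) else None,
--     ]
--     # one precomputed line of 2k-1 cells per direction; None marks an out-of-bounds
--     # or missing cell, which can never equal a pattern entry
--     lines = [[f(o) for o in range(-(k - 1), k)] for f in cells]
--
--     count = 0
--     for i in range(k):
--         if pattern[i] == 'X':
--             for line in lines:
--                 if line[k - 1 - i: 2 * k - 1 - i] == pattern:
--                     count += 1
--     return count
-- ===== Notes on version B (the rewrite author's own statement) =====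
-- stated objective: alternative
-- what changed: Instead of rebuilding a fresh bounds-checked sample for every (pattern index, direction) pair with break/try semantics, B precomputes one line of 2k-1 optional cells per direction (None marks out-of-bounds or missing cells, replicating the original's len(state[0]) bound) and counts the pattern-index shifts whose length-k slice of that line equals the pattern.
import Mathlib
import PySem

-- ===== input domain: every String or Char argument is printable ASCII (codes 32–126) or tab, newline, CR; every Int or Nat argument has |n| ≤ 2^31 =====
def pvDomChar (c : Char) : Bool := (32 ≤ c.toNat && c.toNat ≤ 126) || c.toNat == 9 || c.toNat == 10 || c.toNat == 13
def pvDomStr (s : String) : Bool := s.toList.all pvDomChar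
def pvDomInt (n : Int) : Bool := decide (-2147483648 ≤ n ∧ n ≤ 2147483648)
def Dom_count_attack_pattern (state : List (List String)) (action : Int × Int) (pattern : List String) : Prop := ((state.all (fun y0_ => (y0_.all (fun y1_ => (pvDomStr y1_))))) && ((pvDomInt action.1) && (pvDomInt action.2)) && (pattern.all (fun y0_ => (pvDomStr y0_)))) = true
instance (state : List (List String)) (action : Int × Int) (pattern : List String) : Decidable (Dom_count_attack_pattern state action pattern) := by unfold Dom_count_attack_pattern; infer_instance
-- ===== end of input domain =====

-- B precomputes one line of optional cells per direction and compares pattern-length slices of it,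
-- instead of rebuilding a fresh sample per (index, direction); equivalence is about the RETURN value
-- (both A and B also mutate state by placing "X" at the action cell).

-- ===== PORT A =====
-- Python's `state[row][col] = 'X'` (exact where the indices are valid Python indices, i.e. under Pre_)
def pvSetCell (state : List (List String)) (row col : Int) : List (List String) :=
  let r := (if row < 0 then row + state.length else row).toNat
  let rowl := state.getD r []
  let c := (if col < 0 then col + rowl.length else col).toNat
  state.set r (rowl.set c "X")

-- `state[r][c]` inside a try: none = IndexError (caught by A's `except`)
def pvFetch (st : List (List String)) (r c : Int) : Option String :=
  (PySem.List.pyGet? st r).bind (fun l => PySem.List.pyGet? l c)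

-- A's try-block sample loop: `some sample` if no exception was raised (a break yields the short
-- prefix built so far), `none` if an access raised (the whole try-block is skipped)
def pvBuild (test : Int → Bool) (get : Int → Option String) : List Int → Option (List String)
  | [] => some []
  | j :: rest =>
    if test j then
      match get j with
      | some v => (pvBuild test get rest).map (fun s => v :: s)
      | none => none
    else some []

def count_attack_pattern (state : List (List String)) (action : Int × Int) (pattern : List String) : Int :=
  let row := action.1
  let col := action.2
  let st := pvSetCell state row col
  let k : Int := pattern.length
  let len0 : Int := (st.headD []).length
  (PySem.List.pyRange 0 k 1).foldl (fun count i =>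
    if PySem.List.pyGet? pattern i = some "X" then
      let c1 := if pvBuild (fun j => !(decide (j < 0) || decide (len0 ≤ j)))
          (fun j => pvFetch st row j) (PySem.List.pyRange (col - i) (col + k - i) 1) = some pattern then count + 1 else count
      let c2 := if pvBuild (fun j => !(decide (j < 0) || decide (len0 ≤ j)))
          (fun j => pvFetch st j col) (PySem.List.pyRange (row - i) (row + k - i) 1) = some pattern then c1 + 1 else c1
      let c3 := if pvBuild (fun j => !(decide (row + j < 0) || decide (len0 ≤ row + j)) && !(decide (col + j < 0) || decide (len0 ≤ col + j)))
          (fun j => pvFetch st (row + j) (col + j)) (PySem.List.pyRange (-i) (k - i) 1) = some pattern then c2 + 1 else c2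
      let c4 := if pvBuild (fun j => !(decide (row - j < 0) || decide (len0 ≤ row - j)) && !(decide (col + j < 0) || decide (len0 ≤ col + j)))
          (fun j => pvFetch st (row - j) (col + j)) (PySem.List.pyRange (-i) (k - i) 1) = some pattern then c3 + 1 else c3
      c4
    else count) 0

-- ===== PORT B =====
def count_attack_pattern_alt (state : List (List String)) (action : Int × Int) (pattern : List String) : Int :=
  let row := action.1
  let col := action.2
  let st := pvSetCell state row col
  let k : Int := pattern.length
  let len0 : Int := (st.headD []).length
  let bound := fun v : Int => decide (0 ≤ v) && decide (v < len0)
  let offs := PySem.List.pyRange (-(k - 1)) k 1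
  let line1 := offs.map (fun o => if (bound (col + o)) = true then pvFetch st row (col + o) else none)
  let line2 := offs.map (fun o => if (bound (row + o)) = true then pvFetch st (row + o) col else none)
  let line3 := offs.map (fun o => if (bound (row + o) && bound (col + o)) = true then pvFetch st (row + o) (col + o) else none)
  let line4 := offs.map (fun o => if (bound (row - o) && bound (col + o)) = true then pvFetch st (row - o) (col + o) else none)
  let target := pattern.map some
  (PySem.List.pyRange 0 k 1).foldl (fun count i =>
    if PySem.List.pyGet? pattern i = some "X" then
      count + ([line1, line2, line3, line4].foldl (fun c line =>
        if PySem.List.slice line (some (k - 1 - i)) (some (2 * k - 1 - i)) = target then c + 1 else c) 0)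
    else count) 0

-- ===== PRECONDITION & SPEC =====
-- Pre_ excludes exactly the inputs on which `state[row][col] = 'X'` raises an IndexError
-- (everything after that line sits in try/except in A); elsewhere A returns normally.
def Pre_count_attack_pattern (state : List (List String)) (action : Int × Int) (pattern : List String) : Prop :=
  -(state.length : Int) ≤ action.1 ∧ action.1 < (state.length : Int) ∧
  -(((state.getD (if action.1 < 0 then action.1 + state.length else action.1).toNat []).length : Int)) ≤ action.2 ∧
  action.2 < (((state.getD (if action.1 < 0 then action.1 + state.length else action.1).toNat []).length : Int))
instance (state : List (List String)) (action : Int × Int) (pattern : List String) : Decidable (Pre_count_attack_pattern state action pattern) := by unfold Pre_count_attack_pattern; infer_instance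
def pvWitness_count_attack_pattern : List (List String) × (Int × Int) × List String := ([["O", "X"], ["X", "O"]], (0, 0), ["X", "X"])
def Spec_count_attack_pattern (state : List (List String)) (action : Int × Int) (pattern : List String) (out : Int) : Prop := out = count_attack_pattern_alt state action pattern
instance (state : List (List String)) (action : Int × Int) (pattern : List String) (out : Int) : Decidable (Spec_count_attack_pattern state action pattern out) := by unfold Spec_count_attack_pattern; infer_instance

-- ===== CLAIM (what is proved, stated in full; the proofs are below) =====
def Claim_equal_count_attack_pattern : Prop := ∀ (state : List (List String)) (action : Int × Int) (pattern : List String), Dom_count_attack_pattern state action pattern → Pre_count_attack_pattern state action pattern → Spec_count_attack_pattern state action pattern (count_attack_pattern state action pattern)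

-- ===== LEMMAS AND PROOFS =====

theorem pvBuild_map (t : Int → Bool) (g : Int → Option String) (h : Int → Int) (js : List Int) :
    pvBuild t g (js.map h) = pvBuild (fun o => t (h o)) (fun o => g (h o)) js := by
  induction js with
  | nil => rfl
  | cons j rest ih => simp only [List.map_cons, pvBuild, ih]

theorem pvBuild_eq (t : Int → Bool) (g : Int → Option String) (js : List Int) (p : List String)
    (hlen : js.length = p.length) :
    (pvBuild t g js = some p ↔ js.map (fun j => if t j then g j else none) = p.map some) := by
  induction js generalizing p with
  | nil =>
    cases p with
    | nil => simp [pvBuild]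
    | cons v ps => simp at hlen
  | cons j rest ih =>
    cases p with
    | nil => simp at hlen
    | cons v ps =>
      simp only [List.length_cons, Nat.add_right_cancel_iff] at hlen
      by_cases ht : t j
      · cases hg : g j with
        | none => simp [pvBuild, ht, hg]
        | some w =>
          cases hb : pvBuild t g rest with
          | none =>
            have hm : rest.map (fun j => if t j then g j else none) ≠ ps.map some := by
              intro hm
              have h2 := (ih ps hlen).mpr hm
              rw [hb] at h2
              simp at h2
            simp [pvBuild, ht, hg, hb, hm]
          | some l =>
            have hiff : l = ps ↔ rest.map (fun j => if t j then g j else none) = ps.map some := by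
              rw [← ih ps hlen, hb]
              simp
            simp [pvBuild, ht, hg, hb, hiff]
      · simp [pvBuild, ht]

theorem pvRange_shift (c a b : Int) :
    PySem.List.pyRange (c + a) (c + b) 1 = (PySem.List.pyRange a b 1).map (fun o => c + o) := by
  rw [PySem.List.pyRange_one, PySem.List.pyRange_one, List.map_map]
  have : c + b - (c + a) = b - a := by ring
  rw [this]
  apply List.map_congr_left
  intro x _
  simp; ring

theorem pvRange_drop (n : Nat) : ∀ (a b : Int), (PySem.List.pyRange a b 1).drop n = PySem.List.pyRange (a + n) b 1 := by
  induction n with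
  | zero => intro a b; simp
  | succ m ih =>
    intro a b
    by_cases h : b ≤ a
    · rw [PySem.List.pyRange_one_eq_nil h, PySem.List.pyRange_one_eq_nil (by push_cast; omega)]
      simp
    · rw [PySem.List.pyRange_one_cons (by omega), List.drop_succ_cons, ih]
      congr 1
      push_cast
      ring

theorem pvRange_take (n : Nat) (a b : Int) :
    (PySem.List.pyRange a b 1).take n = PySem.List.pyRange a (min b (a + n)) 1 := by
  rw [PySem.List.pyRange_one, ← List.map_take, List.take_range, PySem.List.pyRange_one]
  have h : min n ((b - a).toNat) = (min b (a + n) - a).toNat := by omega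
  rw [h]

-- the heart: A's sample-vs-pattern test at shift i IS B's slice-vs-pattern test on the prebuilt line
theorem pvCore (t : Int → Bool) (g : Int → Option String) (p : List String) (i : Int)
    (h0 : 0 ≤ i) (hik : i < (p.length : Int)) :
    (pvBuild t g (PySem.List.pyRange (-i) ((p.length : Int) - i) 1) = some p ↔
      PySem.List.slice ((PySem.List.pyRange (-((p.length : Int) - 1)) (p.length : Int) 1).map
          (fun o => if t o = true then g o else none))
        (some ((p.length : Int) - 1 - i)) (some (2 * (p.length : Int) - 1 - i)) = p.map some) := by
  set k : Int := (p.length : Int) with hk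
  rw [PySem.List.slice_toNat _ (by omega) (by omega)]
  rw [← List.map_drop, ← List.map_take]
  rw [pvRange_drop, pvRange_take]
  have h1 : -(k - 1) + ((k - 1 - i).toNat : Int) = -i := by omega
  have h2 : min k (-i + (((2 * k - 1 - i).toNat - (k - 1 - i).toNat : Nat) : Int)) = k - i := by
    omega
  rw [h1, h2]
  rw [pvBuild_eq t g _ p (by rw [PySem.List.length_pyRange_one]; omega)]

-- A's break test equals B's bound test
theorem pvTest_eq (len0 : Int) :
    (fun j => !(decide (j < 0) || decide (len0 ≤ j))) = (fun v : Int => decide (0 ≤ v) && decide (v < len0)) := by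
  funext j
  by_cases h1 : j < 0 <;> by_cases h2 : len0 ≤ j <;> simp [h1, h2] <;> omega

-- ===== VERDICT (by name: the statement is the Claim_ definition above) =====
theorem count_attack_pattern_spec : Claim_equal_count_attack_pattern := by
  intro state action pattern _hdom _hpre
  unfold Spec_count_attack_pattern
  unfold count_attack_pattern count_attack_pattern_alt
  simp only []
  apply PySem.List.foldl_congr_mem
  intro count i hi
  rw [PySem.List.mem_pyRange_one] at hi
  by_cases hX : PySem.List.pyGet? pattern i = some "X"
  · simp only [if_pos hX, List.foldl]
    set st := pvSetCell state action.1 action.2 with hst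
    set row := action.1
    set col := action.2
    set k : Int := (pattern.length : Int) with hk
    set len0 : Int := ((st.headD []).length : Int) with hlen0
    -- direction (0,1)
    have e1 : (pvBuild (fun j => !(decide (j < 0) || decide (len0 ≤ j)))
        (fun j => pvFetch st row j) (PySem.List.pyRange (col - i) (col + k - i) 1) = some pattern) ↔
        (PySem.List.slice ((PySem.List.pyRange (-(k - 1)) k 1).map
          (fun o => if (decide (0 ≤ col + o) && decide (col + o < len0)) = true then pvFetch st row (col + o) else none))
          (some (k - 1 - i)) (some (2 * k - 1 - i)) = pattern.map some) := by
      rw [pvTest_eq]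
      have hr : PySem.List.pyRange (col - i) (col + k - i) 1 =
          (PySem.List.pyRange (-i) (k - i) 1).map (fun o => col + o) := by
        have := pvRange_shift col (-i) (k - i)
        rw [show col + -i = col - i by ring, show col + (k - i) = col + k - i by ring] at this
        exact this
      rw [hr, pvBuild_map]
      exact pvCore _ _ pattern i hi.1 hi.2
    -- direction (1,0)
    have e2 : (pvBuild (fun j => !(decide (j < 0) || decide (len0 ≤ j)))
        (fun j => pvFetch st j col) (PySem.List.pyRange (row - i) (row + k - i) 1) = some pattern) ↔
        (PySem.List.slice ((PySem.List.pyRange (-(k - 1)) k 1).map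
          (fun o => if (decide (0 ≤ row + o) && decide (row + o < len0)) = true then pvFetch st (row + o) col else none))
          (some (k - 1 - i)) (some (2 * k - 1 - i)) = pattern.map some) := by
      rw [pvTest_eq]
      have hr : PySem.List.pyRange (row - i) (row + k - i) 1 =
          (PySem.List.pyRange (-i) (k - i) 1).map (fun o => row + o) := by
        have := pvRange_shift row (-i) (k - i)
        rw [show row + -i = row - i by ring, show row + (k - i) = row + k - i by ring] at this
        exact this
      rw [hr, pvBuild_map]
      exact pvCore _ _ pattern i hi.1 hi.2
    -- direction (1,1)
    have e3 : (pvBuild (fun j => !(decide (row + j < 0) || decide (len0 ≤ row + j)) && !(decide (col + j < 0) || decide (len0 ≤ col + j)))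
        (fun j => pvFetch st (row + j) (col + j)) (PySem.List.pyRange (-i) (k - i) 1) = some pattern) ↔
        (PySem.List.slice ((PySem.List.pyRange (-(k - 1)) k 1).map
          (fun o => if ((decide (0 ≤ row + o) && decide (row + o < len0)) && (decide (0 ≤ col + o) && decide (col + o < len0))) = true then pvFetch st (row + o) (col + o) else none))
          (some (k - 1 - i)) (some (2 * k - 1 - i)) = pattern.map some) := by
      have ht : (fun j => !(decide (row + j < 0) || decide (len0 ≤ row + j)) && !(decide (col + j < 0) || decide (len0 ≤ col + j)))
          = (fun j => (decide (0 ≤ row + j) && decide (row + j < len0)) && (decide (0 ≤ col + j) && decide (col + j < len0))) := by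
        funext j
        have h1 := congrFun (pvTest_eq len0) (row + j)
        have h2 := congrFun (pvTest_eq len0) (col + j)
        simp only at h1 h2
        rw [h1, h2]
      rw [ht]
      exact pvCore _ _ pattern i hi.1 hi.2
    -- direction (1,-1)
    have e4 : (pvBuild (fun j => !(decide (row - j < 0) || decide (len0 ≤ row - j)) && !(decide (col + j < 0) || decide (len0 ≤ col + j)))
        (fun j => pvFetch st (row - j) (col + j)) (PySem.List.pyRange (-i) (k - i) 1) = some pattern) ↔
        (PySem.List.slice ((PySem.List.pyRange (-(k - 1)) k 1).map
          (fun o => if ((decide (0 ≤ row - o) && decide (row - o < len0)) && (decide (0 ≤ col + o) && decide (col + o < len0))) = true then pvFetch st (row - o) (col + o) else none))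
          (some (k - 1 - i)) (some (2 * k - 1 - i)) = pattern.map some) := by
      have ht : (fun j => !(decide (row - j < 0) || decide (len0 ≤ row - j)) && !(decide (col + j < 0) || decide (len0 ≤ col + j)))
          = (fun j => (decide (0 ≤ row - j) && decide (row - j < len0)) && (decide (0 ≤ col + j) && decide (col + j < len0))) := by
        funext j
        have h1 := congrFun (pvTest_eq len0) (row - j)
        have h2 := congrFun (pvTest_eq len0) (col + j)
        simp only at h1 h2
        rw [h1, h2]
      rw [ht]
      exact pvCore _ _ pattern i hi.1 hi.2
    simp only [e1, e2, e3, e4]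
    split_ifs <;> omega
  · simp [hX]
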